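-- pv_equiv track=rewrite | github.com/RuasGAR/ex-algProg | ex12.py | anagrama
-- ===== SOURCE A (Python) =====
-- def anagrama(a,b):
--     a = list(a);
--     b = list(b);
--
--     for item in a:
--         if (item in b):
--             del b[b.index(item)]; #Exclui o item de acordo com sua posição em B. Index só pega o índice do primeiro, então letras repetidas não são problemas.
--     if(len(b) == 0): #Se b estiver vazia, todos os elementos de a foram encontrados em b. Logo, são anagramas;
--         return True;
--     else:
--         return False;
-- ===== SOURCE B (Python) =====
-- def anagrama(a, b):
--     need = {}
--     for ch in b:
--         need[ch] = need.get(ch, 0) + 1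
--     have = {}
--     for ch in a:
--         have[ch] = have.get(ch, 0) + 1
--     return all(have.get(ch, 0) >= n for ch, n in need.items())
-- ===== Notes on version B (the rewrite author's own statement) =====
-- stated objective: faster
-- what changed: Replaces A's loop that rescans and destructively deletes from list(b) for each character of a with two one-pass character-count dictionaries and a per-key count comparison.
import Mathlib
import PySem

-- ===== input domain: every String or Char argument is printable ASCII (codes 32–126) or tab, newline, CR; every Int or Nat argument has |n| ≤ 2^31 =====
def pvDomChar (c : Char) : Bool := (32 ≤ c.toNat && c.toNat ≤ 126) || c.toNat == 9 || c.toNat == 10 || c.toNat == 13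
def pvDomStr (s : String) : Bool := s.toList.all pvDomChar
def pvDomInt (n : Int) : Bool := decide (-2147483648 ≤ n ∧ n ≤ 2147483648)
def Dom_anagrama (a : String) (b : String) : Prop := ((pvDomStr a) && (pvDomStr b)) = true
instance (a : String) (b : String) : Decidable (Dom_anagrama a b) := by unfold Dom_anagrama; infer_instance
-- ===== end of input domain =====

-- B replaces A's quadratic remove-first-occurrence loop with two one-pass character counters compared per key (faster).


-- ===== PORT A =====
-- 'del b[b.index(item)]' removes the first ==-occurrence of item: that is List.erase (exact).
def anagrama (a : String) (b : String) : Bool :=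
  let bl := (a.toList).foldl (fun bcur item => if bcur.contains item then bcur.erase item else bcur) b.toList
  if bl.length = 0 then true else false

-- ===== PORT B =====
def anagrama_alt (a : String) (b : String) : Bool :=
  let need : PySem.Dict Char Int := (b.toList).foldl (fun d ch => d.insert ch (d.getD ch 0 + 1)) PySem.Dict.empty
  let has : PySem.Dict Char Int := (a.toList).foldl (fun d ch => d.insert ch (d.getD ch 0 + 1)) PySem.Dict.empty
  need.items.all (fun kn => has.getD kn.1 0 ≥ kn.2)

-- ===== PRECONDITION & SPEC =====
def Spec_anagrama (a : String) (b : String) (out : Bool) : Prop := out = anagrama_alt a b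
instance (a : String) (b : String) (out : Bool) : Decidable (Spec_anagrama a b out) := by unfold Spec_anagrama; infer_instance

-- ===== CLAIM (what is proved, stated in full; the proofs are below) =====
def Claim_equal_anagrama : Prop := ∀ (a : String) (b : String), Dom_anagrama a b → Spec_anagrama a b (anagrama a b)

-- ===== LEMMAS AND PROOFS =====

theorem count_foldl_erase (al : List Char) (bl : List Char) (c : Char) :
    ((al.foldl (fun bcur item => if bcur.contains item then bcur.erase item else bcur) bl).count c)
      = bl.count c - al.count c := by
  induction al generalizing bl with
  | nil => simp
  | cons x xs ih =>
      simp only [List.foldl_cons]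
      have hstep : (if bl.contains x then bl.erase x else bl) = bl.erase x := by
        by_cases h : x ∈ bl
        · simp [h]
        · simp [h, List.erase_of_not_mem h]
      rw [hstep, ih, List.count_erase, List.count_cons]
      split_ifs <;> omega

theorem foldl_erase_nil_iff (al bl : List Char) :
    (al.foldl (fun bcur item => if bcur.contains item then bcur.erase item else bcur) bl) = []
      ↔ ∀ c ∈ bl, bl.count c ≤ al.count c := by
  constructor
  · intro h c hc
    have := count_foldl_erase al bl c
    rw [h] at this
    simp at this
    omega
  · intro h
    rw [List.eq_nil_iff_forall_not_mem]
    intro c hc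
    have hpos : 0 < (al.foldl (fun bcur item => if bcur.contains item then bcur.erase item else bcur) bl).count c :=
      List.count_pos_iff.mpr hc
    rw [count_foldl_erase] at hpos
    have hbl : c ∈ bl := List.count_pos_iff.mp (by omega)
    have := h c hbl
    omega

-- ===== VERDICT (by name: the statement is the Claim_ definition above) =====
theorem anagrama_spec : Claim_equal_anagrama := by
  intro a b _
  unfold Spec_anagrama anagrama anagrama_alt
  simp only [PySem.Dict.foldl_insert_getD_add_one_eq_counter, PySem.Dict.items_counter,
    PySem.Dict.getD_counter]
  by_cases h : ∀ c ∈ b.toList, b.toList.count c ≤ a.toList.count c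
  · have hnil := (foldl_erase_nil_iff a.toList b.toList).mpr h
    rw [hnil]
    simp only [List.length_nil, if_pos]
    symm
    rw [List.all_eq_true]
    intro kn hmem
    rcases List.mem_map.mp hmem with ⟨c, hc, rfl⟩
    simp only [decide_eq_true_eq]
    exact_mod_cast h c ((PySem.Set.mem_ofList _ _).mp hc)
  · have hne : (a.toList.foldl (fun bcur item => if bcur.contains item then bcur.erase item else bcur) b.toList) ≠ [] := by
      intro hnil
      exact h ((foldl_erase_nil_iff a.toList b.toList).mp hnil)
    rw [if_neg (by simpa [List.length_eq_zero_iff] using hne)]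
    push Not at h
    obtain ⟨c, hc, hcnt⟩ := h
    symm
    rw [List.all_eq_false]
    refine ⟨(c, (b.toList.count c : Int)), List.mem_map.mpr ⟨c, (PySem.Set.mem_ofList _ _).mpr hc, rfl⟩, ?_⟩
    simp
    exact_mod_cast hcnt
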